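-- pv_equiv track=rewrite | github.com/kevinnbass/TestMaster | organized_codebase/testing/framework_adapter.py | _adapt_to_javascript
-- ===== SOURCE A (Python) =====
-- def _adapt_to_javascript(content: str) -> str:
--     """Adapt Python-like content to JavaScript."""
--
--     # Basic Python to JavaScript adaptations
--     adaptations = {
--         "True": "true",
--         "False": "false",
--         "None": "null",
--         "self.": "this.",
--         "def ": "function ",
--         "__init__": "constructor"
--     }
--
--     adapted = content
--     for python_syntax, js_syntax in adaptations.items():
--         adapted = adapted.replace(python_syntax, js_syntax)
--
--     return adapted
-- ===== SOURCE B (Python) =====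
-- def _adapt_to_javascript(content: str) -> str:
--     """Adapt Python-like content to JavaScript (single-pass table-driven scanner, two phases)."""
--     # Phase 1: keyword literals; phase 2: structural tokens. Two phases (instead of
--     # one) so that a self. token whose letters overlap a just-replaced False is still
--     # rewritten, exactly as the original sequential replaces do.
--     keyword_rules = [("True", "true"), ("False", "false"), ("None", "null")]
--     token_rules = [("self.", "this."), ("def ", "function "), ("__init__", "constructor")]
--
--     def sub_all(rules, text):
--         out = []
--         i = 0
--         n = len(text)
--         while i < n:
--             for py, js in rules:
--                 if text.startswith(py, i):
--                     out.append(js)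
--                     i += len(py)
--                     break
--             else:
--                 out.append(text[i])
--                 i += 1
--         return "".join(out)
--
--     return sub_all(token_rules, sub_all(keyword_rules, content))
-- ===== Notes on version B (the rewrite author's own statement) =====
-- stated objective: alternative
-- what changed: Six sequential full-text str.replace passes are replaced by a table-driven left-to-right scanner that emits output chunk by chunk, run in two phases (keyword literals True/False/None, then structural tokens) so that a self. token whose letters overlap a just-replaced False is still rewritten exactly as the sequential replaces do.
import Mathlib
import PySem

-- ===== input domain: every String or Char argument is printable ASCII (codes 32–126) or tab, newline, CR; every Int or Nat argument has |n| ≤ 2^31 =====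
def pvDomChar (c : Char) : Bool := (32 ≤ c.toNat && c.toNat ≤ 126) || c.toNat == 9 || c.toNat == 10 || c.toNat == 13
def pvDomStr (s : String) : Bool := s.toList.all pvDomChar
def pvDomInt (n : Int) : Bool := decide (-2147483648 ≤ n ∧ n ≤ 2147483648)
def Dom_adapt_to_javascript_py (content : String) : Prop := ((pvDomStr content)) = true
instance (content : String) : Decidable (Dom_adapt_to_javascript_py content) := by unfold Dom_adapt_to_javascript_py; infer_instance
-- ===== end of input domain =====

-- B replaces A's six sequential full-text str.replace passes by a table-driven
-- left-to-right scanner run in two phases (keyword literals, then structural tokens);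
-- same return value, no side effects in either version.

-- ===== PORT A =====
-- the dict literal `adaptations` (distinct keys, insertion order) as an association list
def pvAdaptations : List (String × String) :=
  [("True", "true"), ("False", "false"), ("None", "null"),
   ("self.", "this."), ("def ", "function "), ("__init__", "constructor")]

-- literal port of A: `adapted = content; for python_syntax, js_syntax in adaptations.items(): adapted = adapted.replace(...)`
def adapt_to_javascript_py (content : String) : String :=
  pvAdaptations.foldl (fun adapted pr => PySem.Str.replace adapted pr.1 pr.2) content

-- ===== PORT B =====
-- B's two rule tables (strings, held as their character lists)
def pvKeywordRules : List (List Char × List Char) :=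
  [(['T','r','u','e'], ['t','r','u','e']),
   (['F','a','l','s','e'], ['f','a','l','s','e']),
   (['N','o','n','e'], ['n','u','l','l'])]

def pvTokenRules : List (List Char × List Char) :=
  [(['s','e','l','f','.'], ['t','h','i','s','.']),
   (['d','e','f',' '], ['f','u','n','c','t','i','o','n',' ']),
   (['_','_','i','n','i','t','_','_'], ['c','o','n','s','t','r','u','c','t','o','r'])]

-- B's inner `for py, js in rules: if text.startswith(py, i): ...` — first rule matching here
def pvFindRule : List (List Char × List Char) → List Char → Option (List Char × Nat)
  | [], _ => none
  | (p, r) :: rest, cs => if p.isPrefixOf cs then some (r, p.length) else pvFindRule rest cs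

-- B's `sub_all` scan loop; the `0 < n` test is only a totality guard (all rule
-- patterns are nonempty, so the else branch is never taken for B's tables)
def pvScan (rules : List (List Char × List Char)) : List Char → List Char
  | [] => []
  | c :: t =>
    match pvFindRule rules (c :: t) with
    | some (r, n) =>
      if _h : 0 < n then r ++ pvScan rules (List.drop n (c :: t))
      else c :: pvScan rules t
    | none => c :: pvScan rules t
  termination_by cs => cs.length
  decreasing_by all_goals (simp [List.length_drop]; try omega)

-- port of B: `sub_all(token_rules, sub_all(keyword_rules, content))`
def adapt_to_javascript_py_alt (content : String) : String :=
  String.ofList (pvScan pvTokenRules (pvScan pvKeywordRules content.toList))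

-- ===== PRECONDITION & SPEC =====
def Spec_adapt_to_javascript_py (content : String) (out : String) : Prop := out = adapt_to_javascript_py_alt content
instance (content : String) (out : String) : Decidable (Spec_adapt_to_javascript_py content out) := by unfold Spec_adapt_to_javascript_py; infer_instance

-- ===== CLAIM (what is proved, stated in full; the proofs are below) =====
def Claim_equal_adapt_to_javascript_py : Prop := ∀ (content : String), Dom_adapt_to_javascript_py content → Spec_adapt_to_javascript_py content (adapt_to_javascript_py content)

-- ===== LEMMAS AND PROOFS =====

-- leftmost non-overlapping replace-all of the nonempty pattern c0::p' by r
def rep (c0 : Char) (p' r : List Char) : List Char → List Char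
  | [] => []
  | c :: t =>
    if (c0 :: p').isPrefixOf (c :: t) then r ++ rep c0 p' r (List.drop p'.length t)
    else c :: rep c0 p' r t
  termination_by s => s.length
  decreasing_by all_goals (simp [List.length_drop]; try omega)

theorem rep_nil (c0 : Char) (p' r : List Char) : rep c0 p' r [] = [] := by rw [rep]

theorem rep_skip (c0 : Char) (p' r : List Char) (c : Char) (t : List Char)
    (h : ¬ (c0 :: p').isPrefixOf (c :: t) = true) :
    rep c0 p' r (c :: t) = c :: rep c0 p' r t := by
  rw [rep, if_neg h]

theorem rep_eat (c0 : Char) (p' r x : List Char) :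
    rep c0 p' r ((c0 :: p') ++ x) = r ++ rep c0 p' r x := by
  have hshape : (c0 :: p') ++ x = c0 :: (p' ++ x) := rfl
  rw [hshape, rep, if_pos, List.drop_left]
  exact List.isPrefixOf_iff_prefix.mpr ⟨x, rfl⟩

theorem go_eq (c0 : Char) (p' r : List Char) :
    ∀ (fuel : Nat) (l acc : List Char), l.length ≤ fuel →
      PySem.Chars.replace.go (c0 :: p') r fuel l acc = acc.reverse ++ rep c0 p' r l := by
  intro fuel
  induction fuel with
  | zero =>
    intro l acc h
    have hl : l = [] := List.eq_nil_of_length_eq_zero (Nat.le_zero.mp h)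
    subst hl
    simp [PySem.Chars.replace.go, rep_nil]
  | succ n ih =>
    intro l acc h
    cases l with
    | nil => simp [PySem.Chars.replace.go, rep_nil]
    | cons c t =>
      by_cases hp : (c0 :: p').isPrefixOf (c :: t) = true
      · rw [PySem.Chars.replace.go]
        simp only [hp, if_pos]
        have hlen : (List.drop (c0 :: p').length (c :: t)).length ≤ n := by
          simp only [List.length_cons] at h
          simp only [List.length_drop, List.length_cons]
          omega
        rw [ih _ _ hlen, rep, if_pos hp]
        simp [List.drop_succ_cons, List.append_assoc]
      · rw [PySem.Chars.replace.go]
        simp only [hp]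
        rw [ih t (c :: acc) (by simpa using Nat.succ_le_succ_iff.mp (by simpa using h)),
            rep_skip _ _ _ _ _ hp]
        simp

theorem replace_eq_rep (c0 : Char) (p' r s : List Char) :
    PySem.Chars.replace s (c0 :: p') r = rep c0 p' r s := by
  rw [PySem.Chars.replace]
  simp only [List.isEmpty_cons, ite_false, Bool.false_eq_true]
  rw [go_eq c0 p' r s.length s [] (le_refl _)]
  simp

theorem prefix_append_cases {q r z : List Char} (h : q <+: r ++ z) : q <+: r ∨ r <+: q := by
  rcases Nat.lt_or_ge r.length q.length with hlt | hle
  · right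
    have hq : q = (r ++ z).take q.length := List.prefix_iff_eq_take.mp h
    have : q.take r.length = r := by
      rw [hq, List.take_take, min_eq_left (le_of_lt hlt), List.take_left]
    rw [← this]
    exact List.take_prefix _ _
  · left
    have hq : q = (r ++ z).take q.length := List.prefix_iff_eq_take.mp h
    rw [List.take_append_of_le_length hle] at hq
    rw [hq]
    exact List.take_prefix _ _

theorem rep_append_free (c0 : Char) (p' r : List Char) (a : List Char)
    (h : ∀ i, i < a.length → ¬ ((c0 :: p').take (a.length - i) <+: List.drop i a)) :
    ∀ x, rep c0 p' r (a ++ x) = a ++ rep c0 p' r x := by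
  induction a with
  | nil => intro x; simp
  | cons b a2 iha =>
    intro x
    have hnp : ¬ (c0 :: p').isPrefixOf (b :: (a2 ++ x)) = true := by
      rw [List.isPrefixOf_iff_prefix]
      intro hpre
      have h1 : (c0 :: p').take ((b :: a2).length) <+: ((b :: a2) ++ x).take ((b :: a2).length) :=
        hpre.take _
      rw [List.take_left] at h1
      exact h 0 (by simp) (by simpa using h1)
    have hshape : (b :: a2) ++ x = b :: (a2 ++ x) := rfl
    rw [hshape, rep_skip _ _ _ _ _ hnp,
        iha (fun i hi => by
          have := h (i + 1) (by simp; omega)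
          simpa using this)]
    rfl

theorem prefix_transfer (c0 : Char) (p' r : List Char) :
    ∀ (q : List Char),
      (∀ j, j < q.length → ¬ (List.drop j q <+: r) ∧ ¬ (r <+: List.drop j q)) →
      ∀ x, q <+: rep c0 p' r x → q <+: x := by
  intro q
  induction q with
  | nil => intro _ x _; exact List.nil_prefix
  | cons d q' ihq =>
    intro hcond x h
    by_cases hpre : (c0 :: p').isPrefixOf x = true
    · obtain ⟨u, hu⟩ := List.isPrefixOf_iff_prefix.mp hpre
      rw [← hu, rep_eat] at h
      rcases prefix_append_cases h with h1 | h1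
      · exact absurd h1 (hcond 0 (by simp)).1
      · exact absurd h1 (hcond 0 (by simp)).2
    · cases x with
      | nil =>
        rw [rep_nil] at h
        exact absurd (List.prefix_nil.mp h) (by simp)
      | cons e t =>
        rw [rep_skip _ _ _ _ _ hpre] at h
        obtain ⟨hde, h2⟩ := List.cons_prefix_cons.mp h
        exact List.cons_prefix_cons.mpr
          ⟨hde, ihq (fun j hj => by simpa using hcond (j + 1) (by simpa using Nat.succ_lt_succ hj)) t h2⟩

theorem scan_nil (rules : List (List Char × List Char)) : pvScan rules [] = [] := by
  rw [pvScan.eq_def]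

-- unfold one scan step (dependent if turned into plain if)
theorem scan_cons (rules : List (List Char × List Char)) (c : Char) (t : List Char) :
    pvScan rules (c :: t) =
      match pvFindRule rules (c :: t) with
      | some (r, n) => if 0 < n then r ++ pvScan rules (List.drop n (c :: t)) else c :: pvScan rules t
      | none => c :: pvScan rules t := by
  rw [pvScan.eq_def]
  rcases hf : pvFindRule rules (c :: t) with _ | ⟨r, n⟩
  · simp [hf]
  · simp [hf, dite_eq_ite]

-- ===== phase 1: True/False/None =====

theorem phase1 : ∀ (n : Nat) (s : List Char), s.length ≤ n →
    rep 'N' ['o','n','e'] ['n','u','l','l']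
      (rep 'F' ['a','l','s','e'] ['f','a','l','s','e']
        (rep 'T' ['r','u','e'] ['t','r','u','e'] s)) = pvScan pvKeywordRules s := by
  intro n
  induction n with
  | zero =>
    intro s hs
    have hl : s = [] := List.eq_nil_of_length_eq_zero (Nat.le_zero.mp hs)
    subst hl
    rw [rep_nil, rep_nil, rep_nil, scan_nil]
  | succ n ih =>
    intro s hs
    cases s with
    | nil => rw [rep_nil, rep_nil, rep_nil, scan_nil]
    | cons c t =>
      by_cases hT : (['T','r','u','e'] : List Char).isPrefixOf (c :: t) = true
      · obtain ⟨u, hu⟩ := List.isPrefixOf_iff_prefix.mp hT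
        have hfind : pvFindRule pvKeywordRules (c :: t) = some (['t','r','u','e'], 4) := by
          simp [pvFindRule, pvKeywordRules, hT]
        have hdrop : List.drop 4 (c :: t) = u := by
          rw [← hu]
          exact List.drop_left' rfl
        have hlen : u.length ≤ n := by
          have h1 := congrArg List.length hu
          simp only [List.length_cons] at hs
          simp at h1
          omega
        rw [scan_cons, hfind]; dsimp only
        rw [if_pos (by omega), hdrop]
        rw [← hu, rep_eat,
            rep_append_free 'F' ['a','l','s','e'] ['f','a','l','s','e'] ['t','r','u','e'] (by decide),
            rep_append_free 'N' ['o','n','e'] ['n','u','l','l'] ['t','r','u','e'] (by decide),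
            ih u hlen]
      · by_cases hF : (['F','a','l','s','e'] : List Char).isPrefixOf (c :: t) = true
        · obtain ⟨u, hu⟩ := List.isPrefixOf_iff_prefix.mp hF
          have hfind : pvFindRule pvKeywordRules (c :: t) = some (['f','a','l','s','e'], 5) := by
            simp [pvFindRule, pvKeywordRules, hF, (Bool.eq_false_iff.mpr hT)]
          have hdrop : List.drop 5 (c :: t) = u := by
            rw [← hu]
            exact List.drop_left' rfl
          have hlen : u.length ≤ n := by
            have h1 := congrArg List.length hu
            simp only [List.length_cons] at hs
            simp at h1
            omega
          rw [scan_cons, hfind]; dsimp only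
          rw [if_pos (by omega), hdrop]
          rw [← hu,
              rep_append_free 'T' ['r','u','e'] ['t','r','u','e'] ['F','a','l','s','e'] (by decide),
              rep_eat,
              rep_append_free 'N' ['o','n','e'] ['n','u','l','l'] ['f','a','l','s','e'] (by decide),
              ih u hlen]
        · by_cases hN : (['N','o','n','e'] : List Char).isPrefixOf (c :: t) = true
          · obtain ⟨u, hu⟩ := List.isPrefixOf_iff_prefix.mp hN
            have hfind : pvFindRule pvKeywordRules (c :: t) = some (['n','u','l','l'], 4) := by
              simp [pvFindRule, pvKeywordRules, hN, (Bool.eq_false_iff.mpr hT), (Bool.eq_false_iff.mpr hF)]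
            have hdrop : List.drop 4 (c :: t) = u := by
              rw [← hu]
              exact List.drop_left' rfl
            have hlen : u.length ≤ n := by
              have h1 := congrArg List.length hu
              simp only [List.length_cons] at hs
              simp at h1
              omega
            rw [scan_cons, hfind]; dsimp only
            rw [if_pos (by omega), hdrop]
            rw [← hu,
                rep_append_free 'T' ['r','u','e'] ['t','r','u','e'] ['N','o','n','e'] (by decide),
                rep_append_free 'F' ['a','l','s','e'] ['f','a','l','s','e'] ['N','o','n','e'] (by decide),
                rep_eat,
                ih u hlen]
          · -- no rule matches at the front
            have hfind : pvFindRule pvKeywordRules (c :: t) = none := by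
              simp [pvFindRule, pvKeywordRules, (Bool.eq_false_iff.mpr hT), (Bool.eq_false_iff.mpr hF),
                    (Bool.eq_false_iff.mpr hN)]
            have hlen : t.length ≤ n := by simp only [List.length_cons] at hs; omega
            have hF' : ¬ (['F','a','l','s','e'] : List Char).isPrefixOf
                (c :: rep 'T' ['r','u','e'] ['t','r','u','e'] t) = true := by
              rw [List.isPrefixOf_iff_prefix]
              intro hpre
              obtain ⟨hcF, htail⟩ := List.cons_prefix_cons.mp hpre
              have := prefix_transfer 'T' ['r','u','e'] ['t','r','u','e'] ['a','l','s','e']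
                (by decide) t htail
              exact hF (List.isPrefixOf_iff_prefix.mpr (by rw [← hcF]; exact List.cons_prefix_cons.mpr ⟨rfl, this⟩))
            have hN' : ¬ (['N','o','n','e'] : List Char).isPrefixOf
                (c :: rep 'F' ['a','l','s','e'] ['f','a','l','s','e']
                        (rep 'T' ['r','u','e'] ['t','r','u','e'] t)) = true := by
              rw [List.isPrefixOf_iff_prefix]
              intro hpre
              obtain ⟨hcN, htail⟩ := List.cons_prefix_cons.mp hpre
              have h1 := prefix_transfer 'F' ['a','l','s','e'] ['f','a','l','s','e'] ['o','n','e']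
                (by decide) _ htail
              have h2 := prefix_transfer 'T' ['r','u','e'] ['t','r','u','e'] ['o','n','e']
                (by decide) t h1
              exact hN (List.isPrefixOf_iff_prefix.mpr (by rw [← hcN]; exact List.cons_prefix_cons.mpr ⟨rfl, h2⟩))
            rw [scan_cons, hfind]; dsimp only
            rw [rep_skip _ _ _ _ _ hT, rep_skip _ _ _ _ _ hF', rep_skip _ _ _ _ _ hN', ih t hlen]

-- ===== phase 2: self. / def  / __init__ =====

theorem phase2 : ∀ (n : Nat) (s : List Char), s.length ≤ n →
    rep '_' ['_','i','n','i','t','_','_'] ['c','o','n','s','t','r','u','c','t','o','r']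
      (rep 'd' ['e','f',' '] ['f','u','n','c','t','i','o','n',' ']
        (rep 's' ['e','l','f','.'] ['t','h','i','s','.'] s)) = pvScan pvTokenRules s := by
  intro n
  induction n with
  | zero =>
    intro s hs
    have hl : s = [] := List.eq_nil_of_length_eq_zero (Nat.le_zero.mp hs)
    subst hl
    rw [rep_nil, rep_nil, rep_nil, scan_nil]
  | succ n ih =>
    intro s hs
    cases s with
    | nil => rw [rep_nil, rep_nil, rep_nil, scan_nil]
    | cons c t =>
      by_cases hS : (['s','e','l','f','.'] : List Char).isPrefixOf (c :: t) = true
      · obtain ⟨u, hu⟩ := List.isPrefixOf_iff_prefix.mp hS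
        have hfind : pvFindRule pvTokenRules (c :: t) = some (['t','h','i','s','.'], 5) := by
          simp [pvFindRule, pvTokenRules, hS]
        have hdrop : List.drop 5 (c :: t) = u := by
          rw [← hu]
          exact List.drop_left' rfl
        have hlen : u.length ≤ n := by
          have h1 := congrArg List.length hu
          simp only [List.length_cons] at hs
          simp at h1
          omega
        rw [scan_cons, hfind]; dsimp only
        rw [if_pos (by omega), hdrop]
        rw [← hu, rep_eat,
            rep_append_free 'd' ['e','f',' '] ['f','u','n','c','t','i','o','n',' ']
              ['t','h','i','s','.'] (by decide),
            rep_append_free '_' ['_','i','n','i','t','_','_'] ['c','o','n','s','t','r','u','c','t','o','r']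
              ['t','h','i','s','.'] (by decide),
            ih u hlen]
      · by_cases hD : (['d','e','f',' '] : List Char).isPrefixOf (c :: t) = true
        · obtain ⟨u, hu⟩ := List.isPrefixOf_iff_prefix.mp hD
          have hfind : pvFindRule pvTokenRules (c :: t) = some (['f','u','n','c','t','i','o','n',' '], 4) := by
            simp [pvFindRule, pvTokenRules, hD, (Bool.eq_false_iff.mpr hS)]
          have hdrop : List.drop 4 (c :: t) = u := by
            rw [← hu]
            exact List.drop_left' rfl
          have hlen : u.length ≤ n := by
            have h1 := congrArg List.length hu
            simp only [List.length_cons] at hs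
            simp at h1
            omega
          rw [scan_cons, hfind]; dsimp only
          rw [if_pos (by omega), hdrop]
          rw [← hu,
              rep_append_free 's' ['e','l','f','.'] ['t','h','i','s','.'] ['d','e','f',' '] (by decide),
              rep_eat,
              rep_append_free '_' ['_','i','n','i','t','_','_'] ['c','o','n','s','t','r','u','c','t','o','r']
                ['f','u','n','c','t','i','o','n',' '] (by decide),
              ih u hlen]
        · by_cases hI : (['_','_','i','n','i','t','_','_'] : List Char).isPrefixOf (c :: t) = true
          · obtain ⟨u, hu⟩ := List.isPrefixOf_iff_prefix.mp hI
            have hfind : pvFindRule pvTokenRules (c :: t) =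
                some (['c','o','n','s','t','r','u','c','t','o','r'], 8) := by
              simp [pvFindRule, pvTokenRules, hI, (Bool.eq_false_iff.mpr hS), (Bool.eq_false_iff.mpr hD)]
            have hdrop : List.drop 8 (c :: t) = u := by
              rw [← hu]
              exact List.drop_left' rfl
            have hlen : u.length ≤ n := by
              have h1 := congrArg List.length hu
              simp only [List.length_cons] at hs
              simp at h1
              omega
            rw [scan_cons, hfind]; dsimp only
            rw [if_pos (by omega), hdrop]
            rw [← hu,
                rep_append_free 's' ['e','l','f','.'] ['t','h','i','s','.']
                  ['_','_','i','n','i','t','_','_'] (by decide),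
                rep_append_free 'd' ['e','f',' '] ['f','u','n','c','t','i','o','n',' ']
                  ['_','_','i','n','i','t','_','_'] (by decide),
                rep_eat,
                ih u hlen]
          · have hfind : pvFindRule pvTokenRules (c :: t) = none := by
              simp [pvFindRule, pvTokenRules, (Bool.eq_false_iff.mpr hS), (Bool.eq_false_iff.mpr hD),
                    (Bool.eq_false_iff.mpr hI)]
            have hlen : t.length ≤ n := by simp only [List.length_cons] at hs; omega
            have hD' : ¬ (['d','e','f',' '] : List Char).isPrefixOf
                (c :: rep 's' ['e','l','f','.'] ['t','h','i','s','.'] t) = true := by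
              rw [List.isPrefixOf_iff_prefix]
              intro hpre
              obtain ⟨hcD, htail⟩ := List.cons_prefix_cons.mp hpre
              have := prefix_transfer 's' ['e','l','f','.'] ['t','h','i','s','.'] ['e','f',' ']
                (by decide) t htail
              exact hD (List.isPrefixOf_iff_prefix.mpr (by rw [← hcD]; exact List.cons_prefix_cons.mpr ⟨rfl, this⟩))
            have hI' : ¬ (['_','_','i','n','i','t','_','_'] : List Char).isPrefixOf
                (c :: rep 'd' ['e','f',' '] ['f','u','n','c','t','i','o','n',' ']
                        (rep 's' ['e','l','f','.'] ['t','h','i','s','.'] t)) = true := by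
              rw [List.isPrefixOf_iff_prefix]
              intro hpre
              obtain ⟨hcI, htail⟩ := List.cons_prefix_cons.mp hpre
              have h1 := prefix_transfer 'd' ['e','f',' '] ['f','u','n','c','t','i','o','n',' ']
                ['_','i','n','i','t','_','_'] (by decide) _ htail
              have h2 := prefix_transfer 's' ['e','l','f','.'] ['t','h','i','s','.']
                ['_','i','n','i','t','_','_'] (by decide) t h1
              exact hI (List.isPrefixOf_iff_prefix.mpr (by rw [← hcI]; exact List.cons_prefix_cons.mpr ⟨rfl, h2⟩))
            rw [scan_cons, hfind]; dsimp only
            rw [rep_skip _ _ _ _ _ hS, rep_skip _ _ _ _ _ hD', rep_skip _ _ _ _ _ hI', ih t hlen]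

-- A's six passes, on character lists
theorem A_toList (content : String) :
    (adapt_to_javascript_py content).toList =
      rep '_' ['_','i','n','i','t','_','_'] ['c','o','n','s','t','r','u','c','t','o','r']
        (rep 'd' ['e','f',' '] ['f','u','n','c','t','i','o','n',' ']
          (rep 's' ['e','l','f','.'] ['t','h','i','s','.']
            (rep 'N' ['o','n','e'] ['n','u','l','l']
              (rep 'F' ['a','l','s','e'] ['f','a','l','s','e']
                (rep 'T' ['r','u','e'] ['t','r','u','e'] content.toList))))) := by
  simp only [adapt_to_javascript_py, pvAdaptations, List.foldl_cons, List.foldl_nil,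
    PySem.Str.toList_replace]
  rw [show ("True".toList : List Char) = 'T' :: ['r','u','e'] from rfl,
      show ("true".toList : List Char) = ['t','r','u','e'] from rfl,
      show ("False".toList : List Char) = 'F' :: ['a','l','s','e'] from rfl,
      show ("false".toList : List Char) = ['f','a','l','s','e'] from rfl,
      show ("None".toList : List Char) = 'N' :: ['o','n','e'] from rfl,
      show ("null".toList : List Char) = ['n','u','l','l'] from rfl,
      show ("self.".toList : List Char) = 's' :: ['e','l','f','.'] from rfl,
      show ("this.".toList : List Char) = ['t','h','i','s','.'] from rfl,
      show ("def ".toList : List Char) = 'd' :: ['e','f',' '] from rfl,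
      show ("function ".toList : List Char) = ['f','u','n','c','t','i','o','n',' '] from rfl,
      show ("__init__".toList : List Char) = '_' :: ['_','i','n','i','t','_','_'] from rfl,
      show ("constructor".toList : List Char) = ['c','o','n','s','t','r','u','c','t','o','r'] from rfl]
  rw [replace_eq_rep, replace_eq_rep, replace_eq_rep, replace_eq_rep, replace_eq_rep, replace_eq_rep]

-- ===== VERDICT (by name: the statement is the Claim_ definition above) =====
theorem adapt_to_javascript_py_spec : Claim_equal_adapt_to_javascript_py := by
  unfold Claim_equal_adapt_to_javascript_py
  intro content _
  unfold Spec_adapt_to_javascript_py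
  have hA := A_toList content
  rw [phase1 content.toList.length content.toList (le_refl _)] at hA
  rw [phase2 (pvScan pvKeywordRules content.toList).length _ (le_refl _)] at hA
  have hB : (adapt_to_javascript_py_alt content).toList =
      pvScan pvTokenRules (pvScan pvKeywordRules content.toList) := by
    simp [adapt_to_javascript_py_alt]
  have : (adapt_to_javascript_py content).toList = (adapt_to_javascript_py_alt content).toList := by
    rw [hA, hB]
  exact String.toList_injective this
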